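-- pv_equiv track=rewrite | github.com/maxryanb/NJ_NASAT_BONUSES | nasat.py | create_teams
-- ===== SOURCE A (Python) =====
-- import itertools
--
-- def create_teams(players):
--     result_scores = {}
--     result_strings = {}
--
--     # create list of all size 4 sets of players
--     teams = list(itertools.combinations(players.keys(), 4))
--     for team in teams:
--         result = ""
--
--         # iterate through bonuses
--         for i in range(len(players[team[0]])):
--             got = "0"
--
--             # check if any player got bonus
--             for player in team:
--                 if players[player][i] == "1":
--                     got = "1"
--                     break
--
--             # update result string
--             result += got
--
--         result_scores[team] = result.count("1")
--         result_strings[team] = result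
--
--     return result_scores, result_strings
-- ===== SOURCE B (Python) =====
-- import itertools
--
-- def create_teams(players):
--     # One integer bitset per player (bit for bonus i sits at position len-1-i,
--     # i.e. MSB-first); a team's combined record is then a single `|` of four
--     # ints, its score is a popcount, and the result string is read off the
--     # bits of the combined integer.
--     masks = {}
--     for p, vals in players.items():
--         mask = 0
--         for s in vals:
--             mask = 2 * mask + (1 if s == "1" else 0)
--         masks[p] = mask
--
--     result_scores = {}
--     result_strings = {}
--     for team in itertools.combinations(players.keys(), 4):
--         or_val = masks[team[0]] | masks[team[1]] | masks[team[2]] | masks[team[3]]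
--         m = len(players[team[0]])
--         result_scores[team] = or_val.bit_count()
--         result_strings[team] = "".join(
--             "1" if (or_val >> (m - 1 - i)) & 1 else "0" for i in range(m))
--     return result_scores, result_strings
-- ===== Notes on version B (the rewrite author's own statement) =====
-- stated objective: alternative
-- what changed: B packs each player's bonus record once into a single integer bitset; each team is then scored with one 4-way bitwise OR, an int.bit_count() popcount and bit extraction for the string, so A's inner position-by-position loop over the four players (with dict lookups, string comparisons and string concatenation per position) disappears entirely.
import Mathlib
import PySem

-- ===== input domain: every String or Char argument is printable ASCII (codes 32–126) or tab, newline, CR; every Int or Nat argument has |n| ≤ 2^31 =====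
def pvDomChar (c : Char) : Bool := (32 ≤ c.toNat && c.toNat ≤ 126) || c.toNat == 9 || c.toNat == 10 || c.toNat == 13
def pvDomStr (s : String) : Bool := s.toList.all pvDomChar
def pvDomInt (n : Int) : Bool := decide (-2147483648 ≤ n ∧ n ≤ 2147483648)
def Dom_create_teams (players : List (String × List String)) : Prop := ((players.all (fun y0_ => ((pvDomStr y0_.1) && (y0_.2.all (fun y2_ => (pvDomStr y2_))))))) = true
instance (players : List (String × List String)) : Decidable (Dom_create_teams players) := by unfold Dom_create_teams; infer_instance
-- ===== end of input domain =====

-- B packs each player's bonus record into one integer bitset; a team is then scored by a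
-- single 4-way bitwise OR, a popcount and bit extraction, so A's inner position-by-position
-- loop over the four players disappears (objective: alternative).

-- ===== PORT A =====
/-- `itertools.combinations(xs, k)`: all k-element combinations, in itertools order. -/
def pvCombs : Nat → List String → List (List String)
  | 0, _ => [[]]
  | _ + 1, [] => []
  | k + 1, x :: xs => (pvCombs k xs).map (x :: ·) ++ pvCombs (k + 1) xs

/-- A's inner `for player in team: if players[player][i] == "1": got = "1"; break` loop.
    `players[player][i]` is ported with a list default — exact when `i` is in range,
    which `Pre_create_teams` guarantees. -/
def pvGotA (d : PySem.Dict String (List String)) (i : Nat) : List String → String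
  | [] => "0"
  | p :: rest => if (d.getD p []).getD i "" = "1" then "1" else pvGotA d i rest

def pvBodyA (d : PySem.Dict String (List String))
    (acc : PySem.Dict (List String) Int × PySem.Dict (List String) String)
    (team : List String) :
    PySem.Dict (List String) Int × PySem.Dict (List String) String :=
  let result := (List.range (d.getD (PySem.List.pyGetD team 0 "") []).length).foldl
    (fun r i => r ++ pvGotA d i team) ""
  (acc.1.insert team ((PySem.Str.count result "1" : Nat) : Int), acc.2.insert team result)

def create_teams (players : List (String × List String)) :
    (List (List String × Int)) × (List (List String × String)) :=
  let d := PySem.Dict.ofList players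
  let res := (pvCombs 4 d.keys).foldl (pvBodyA d) (PySem.Dict.empty, PySem.Dict.empty)
  (res.1.items, res.2.items)

-- ===== PORT B =====
/-- B's per-player packing loop: `mask = 2 * mask + (1 if s == "1" else 0)`. -/
def pvMaskOf (vals : List String) : Int :=
  vals.foldl (fun n s => 2 * n + (if s == "1" then 1 else 0)) 0

/-- B's first loop building `masks`. -/
def pvMasks (d : PySem.Dict String (List String)) : PySem.Dict String Int :=
  d.items.foldl (fun m pv => m.insert pv.1 (pvMaskOf pv.2)) PySem.Dict.empty

def pvBodyB (d : PySem.Dict String (List String)) (masks : PySem.Dict String Int)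
    (acc : PySem.Dict (List String) Int × PySem.Dict (List String) String)
    (team : List String) :
    PySem.Dict (List String) Int × PySem.Dict (List String) String :=
  match team with
  | t0 :: t1 :: t2 :: t3 :: _ =>
    let orv := PySem.Int.bor (PySem.Int.bor (PySem.Int.bor (masks.getD t0 0) (masks.getD t1 0))
      (masks.getD t2 0)) (masks.getD t3 0)
    let m := (d.getD t0 []).length
    (acc.1.insert team ((PySem.Int.bitCount orv : Nat) : Int),
     acc.2.insert team (PySem.Str.join "" ((List.range m).map
       (fun i => if PySem.Int.band (orv >>> (m - 1 - i)) 1 ≠ 0 then "1" else "0"))))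
  | _ => acc  -- unreachable: combinations always yield 4 names

def create_teams_alt (players : List (String × List String)) :
    (List (List String × Int)) × (List (List String × String)) :=
  let d := PySem.Dict.ofList players
  let masks := pvMasks d
  let res := (pvCombs 4 d.keys).foldl (pvBodyB d masks) (PySem.Dict.empty, PySem.Dict.empty)
  (res.1.items, res.2.items)

-- ===== PRECONDITION & SPEC =====
-- Pre_ admits dicts with fewer than 4 distinct names (no teams) or with equal-length bonus
-- lists (the intended uniform domain); unequal-length inputs are excluded because there A
-- raises IndexError, or returns a value truncated to the first player's list length while
-- B's bitsets also see the longer lists' bonuses.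
def Pre_create_teams (players : List (String × List String)) : Prop :=
  (PySem.List.dedup (players.map (·.1))).length < 4 ∨
  (∀ p ∈ players, ∀ q ∈ players, p.2.length = q.2.length)

instance (players : List (String × List String)) : Decidable (Pre_create_teams players) := by
  unfold Pre_create_teams; infer_instance

def pvWitness_create_teams : (List (String × List String)) :=
  [("a", ["1", "0"]), ("b", ["0", "0"]), ("c", ["0", "1"]), ("d", ["1", "1"])]

def Spec_create_teams (players : List (String × List String)) (out : (List (List String × Int)) × (List (List String × String))) : Prop := out = create_teams_alt players
instance (players : List (String × List String)) (out : (List (List String × Int)) × (List (List String × String))) : Decidable (Spec_create_teams players out) := by unfold Spec_create_teams; infer_instance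

-- ===== CLAIM (what is proved, stated in full; the proofs are below) =====
def Claim_equal_create_teams : Prop := ∀ (players : List (String × List String)), Dom_create_teams players → Pre_create_teams players → Spec_create_teams players (create_teams players)

-- ===== LEMMAS AND PROOFS =====

lemma pvUpdate_nil {κ ν : Type} [BEq κ] (d : PySem.Dict κ ν) : d.update [] = d := rfl

lemma pvUpdate_cons {κ ν : Type} [BEq κ] (d : PySem.Dict κ ν) (p : κ × ν) (ps : List (κ × ν)) :
    d.update (p :: ps) = (d.insert p.1 p.2).update ps := rfl

lemma pvMem_keys_update {κ ν : Type} [BEq κ] [LawfulBEq κ] :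
    ∀ (ps : List (κ × ν)) (d : PySem.Dict κ ν) (k : κ),
      k ∈ (d.update ps).keys ↔ k ∈ d.keys ∨ k ∈ ps.map (·.1) := by
  intro ps
  induction ps with
  | nil => intro d k; simp [pvUpdate_nil]
  | cons p ps ih =>
    intro d k
    rw [pvUpdate_cons, ih]
    simp [PySem.Dict.mem_keys_insert]
    tauto

lemma pvMem_items_update {κ ν : Type} [BEq κ] [LawfulBEq κ] :
    ∀ (ps : List (κ × ν)) (d : PySem.Dict κ ν) (q : κ × ν),
      q ∈ (d.update ps).items → q ∈ d.items ∨ q ∈ ps := by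
  intro ps
  induction ps with
  | nil => intro d q h; rw [pvUpdate_nil] at h; exact Or.inl h
  | cons p ps ih =>
    intro d q h
    rw [pvUpdate_cons] at h
    rcases ih _ _ h with h' | h'
    · rcases (PySem.Dict.mem_items_insert _ _ _ _).1 h' with h'' | h''
      · right; simp [h'']
      · exact Or.inl h''.1
    · right; simp [h']

lemma pvMem_items_ofList {κ ν : Type} [BEq κ] [LawfulBEq κ]
    (ps : List (κ × ν)) (q : κ × ν) (h : q ∈ (PySem.Dict.ofList ps).items) : q ∈ ps := by
  have := pvMem_items_update ps PySem.Dict.empty q h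
  simpa [PySem.Dict.empty] using this

lemma pvCombs_mem : ∀ (l : List String) (k : Nat) (t : List String),
    t ∈ pvCombs k l → t.length = k ∧ t.Sublist l := by
  intro l
  induction l with
  | nil =>
    intro k t ht
    cases k with
    | zero => simp [pvCombs] at ht; simp [ht]
    | succ k => simp [pvCombs] at ht
  | cons a as ih =>
    intro k t ht
    cases k with
    | zero => simp [pvCombs] at ht; simp [ht]
    | succ k =>
      simp only [pvCombs, List.mem_append, List.mem_map] at ht
      rcases ht with ⟨t', ht', rfl⟩ | ht
      · obtain ⟨hl, hm⟩ := ih k t' ht'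
        exact ⟨by simp [hl], List.Sublist.cons₂ a hm⟩
      · obtain ⟨hl, hm⟩ := ih (k + 1) t ht
        exact ⟨hl, List.Sublist.cons a hm⟩

lemma pvCombs_eq_nil : ∀ (l : List String) (k : Nat), l.length < k → pvCombs k l = [] := by
  intro l
  induction l with
  | nil => intro k h; cases k with
    | zero => omega
    | succ k => rfl
  | cons a as ih =>
    intro k h
    cases k with
    | zero => omega
    | succ k =>
      have h1 : as.length < k := by simpa using h
      have h2 : as.length < k + 1 := by omega
      simp [pvCombs, ih k h1, ih (k + 1) h2]

lemma pvMasks_getD (d : PySem.Dict String (List String)) (hnd : d.keys.Nodup)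
    (t : String) (ht : t ∈ d.keys) :
    (pvMasks d).getD t 0 = pvMaskOf (d.getD t []) := by
  simp only [PySem.Dict.keys] at ht
  obtain ⟨p, hp, rfl⟩ := List.mem_map.1 ht
  have hdg : d.getD p.1 [] = p.2 := by
    have : (p.1, p.2) ∈ d.items := by simpa using hp
    exact PySem.Dict.getD_of_mem_items d this hnd []
  have hitems : (pvMasks d).items = d.items.map (fun a => (a.1, pvMaskOf a.2)) := by
    unfold pvMasks
    rw [PySem.Dict.items_foldl_insert_fresh d.items (fun pv => pv.1)
      (fun pv => pvMaskOf pv.2) PySem.Dict.empty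
      (fun a _ => by simp [PySem.Dict.contains_empty]) (by exact hnd)]
    simp [show (PySem.Dict.empty : PySem.Dict String Int).items = [] from rfl]
  have hmnd : (pvMasks d).keys.Nodup := by
    unfold pvMasks
    exact PySem.Dict.nodup_keys_foldl_insert_key d.items (fun pv => pv.1) _ _
      (by simp [PySem.Dict.keys_empty])
  have hmem : (p.1, pvMaskOf p.2) ∈ (pvMasks d).items := by
    rw [hitems]
    exact List.mem_map.2 ⟨p, hp, rfl⟩
  rw [PySem.Dict.getD_of_mem_items _ hmem hmnd, hdg]

lemma pvGotA_eq (d : PySem.Dict String (List String)) (i : Nat) :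
    ∀ team : List String,
      pvGotA d i team =
        if (∃ t ∈ team, (d.getD t []).getD i "" = "1") then "1" else "0" := by
  intro team
  induction team with
  | nil => simp [pvGotA]
  | cons p rest ih =>
    simp only [pvGotA, ih]
    by_cases h : (d.getD p []).getD i "" = "1"
    · rw [if_pos h, if_pos ⟨p, by simp, h⟩]
    · rw [if_neg h]
      by_cases hr : ∃ t ∈ rest, (d.getD t []).getD i "" = "1"
      · obtain ⟨t, htm, htp⟩ := hr
        rw [if_pos ⟨t, htm, htp⟩, if_pos ⟨t, List.mem_cons_of_mem p htm, htp⟩]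
      · rw [if_neg hr, if_neg ?_]
        rintro ⟨t, htm, htp⟩
        rcases List.mem_cons.1 htm with rfl | htm'
        · exact h htp
        · exact hr ⟨t, htm', htp⟩

lemma pvExists4 {P : String → Prop} (a b c e : String) :
    (∃ t ∈ ([a, b, c, e] : List String), P t) ↔ P a ∨ P b ∨ P c ∨ P e := by
  simp

lemma pvToList_foldl (g : Nat → String) :
    ∀ (l : List Nat) (s : String),
      (l.foldl (fun r i => r ++ g i) s).toList = l.foldl (fun r i => r ++ (g i).toList) s.toList := by
  intro l
  induction l with
  | nil => intro s; rfl
  | cons x xs ih =>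
    intro s
    simp only [List.foldl_cons, ih, String.toList_append]

lemma pvCountGo_singleton (c : Char) :
    ∀ (cs : List Char) (fuel acc : Nat), cs.length ≤ fuel →
      PySem.Chars.count.go [c] fuel cs acc = acc + cs.count c := by
  intro cs
  induction cs with
  | nil =>
    intro fuel acc h
    cases fuel <;> simp [PySem.Chars.count.go]
  | cons x t ih =>
    intro fuel acc hf
    cases fuel with
    | zero => simp at hf
    | succ f =>
      have ht : t.length ≤ f := by simpa using hf
      by_cases hc : x = c
      · subst hc
        have hgo : PySem.Chars.count.go [x] (f + 1) (x :: t) acc =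
            PySem.Chars.count.go [x] f t (acc + 1) := by
          simp [PySem.Chars.count.go, List.isPrefixOf]
        rw [hgo, ih f (acc + 1) ht, List.count_cons]
        simp
        omega
      · have hbe : (c == x) = false := by
          simp only [beq_eq_false_iff_ne, ne_eq]
          exact fun h' => hc h'.symm
        have hgo : PySem.Chars.count.go [c] (f + 1) (x :: t) acc =
            PySem.Chars.count.go [c] f t acc := by
          simp [PySem.Chars.count.go, List.isPrefixOf, hbe]
        rw [hgo, ih f acc ht, List.count_cons]
        simp [hc]

lemma pvCount_singleton (cs : List Char) (c : Char) :
    PySem.Chars.count cs [c] = cs.count c := by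
  simp [PySem.Chars.count]
  simpa using pvCountGo_singleton c cs cs.length 0 le_rfl

-- value of a bool list read LSB-first
def pvLsb : List Bool → Nat
  | [] => 0
  | b :: t => (if b then 1 else 0) + 2 * pvLsb t

lemma pvTestBit_lsb : ∀ (r : List Bool) (j : Nat), (pvLsb r).testBit j = r.getD j false := by
  intro r
  induction r with
  | nil => intro j; simp [pvLsb]
  | cons b t ih =>
    intro j
    cases j with
    | zero =>
      simp only [pvLsb, Nat.testBit_zero, List.getD]
      cases b <;> simp <;> omega
    | succ j =>
      have hdiv : ((if b then 1 else 0) + 2 * pvLsb t) / 2 = pvLsb t := by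
        cases b <;> simp <;> omega
      simp only [pvLsb, Nat.testBit_add_one, hdiv, ih, List.getD]
      simp

lemma pvLsb_append (b : Bool) :
    ∀ r : List Bool, pvLsb (r ++ [b]) = pvLsb r + (if b then 1 else 0) * 2 ^ r.length := by
  intro r
  induction r with
  | nil => simp [pvLsb]
  | cons x t ih =>
    simp only [List.cons_append, pvLsb, ih, List.length_cons, pow_succ]
    ring

lemma pvMaskOf_foldl :
    ∀ (vals : List String) (acc : Nat),
      vals.foldl (fun n s => 2 * n + (if s == "1" then 1 else 0)) ((acc : Nat) : Int) =
        (((acc * 2 ^ vals.length + pvLsb ((vals.map (fun s => s == "1")).reverse) : Nat)) : Int) := by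
  intro vals
  induction vals with
  | nil => intro acc; simp [pvLsb]
  | cons s t ih =>
    intro acc
    have hcast : (2 * ((acc : Nat) : Int) + (if s == "1" then 1 else 0)) =
        (((2 * acc + (if s == "1" then 1 else 0) : Nat)) : Int) := by
      by_cases h : s = "1" <;> simp [h] <;> push_cast <;> ring
    simp only [List.foldl_cons, hcast, ih]
    congr 1
    simp only [List.map_cons, List.reverse_cons, pvLsb_append, List.length_reverse,
      List.length_map, List.length_cons, pow_succ]
    by_cases h : s = "1" <;> simp [h] <;> ring

lemma pvMaskOf_eq (vals : List String) :
    pvMaskOf vals = ((pvLsb ((vals.map (fun s => s == "1")).reverse) : Nat) : Int) := by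
  have := pvMaskOf_foldl vals 0
  simpa [pvMaskOf] using this

lemma pvBitCount_lsb : ∀ r : List Bool,
    PySem.Int.bitCount ((pvLsb r : Nat) : Int) = r.count true := by
  intro r
  induction r with
  | nil => simp [pvLsb, PySem.Int.bitCount_zero]
  | cons b t ih =>
    cases b with
    | true =>
      have hpos : 0 < pvLsb (true :: t) := by simp [pvLsb]
      rw [PySem.Int.bitCount_natCast (m := pvLsb (true :: t)) hpos]
      have h2 : pvLsb (true :: t) % 2 = 1 := by simp [pvLsb]
      have h3 : pvLsb (true :: t) / 2 = pvLsb t := by simp [pvLsb]; omega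
      rw [h2, h3, ih, List.count_cons]
      simp [add_comm]
    | false =>
      by_cases hz : pvLsb t = 0
      · have h0 : pvLsb (false :: t) = 0 := by simp [pvLsb, hz]
        rw [h0]
        have ih0 : (0 : Nat) = t.count true := by
          rw [← ih, hz]; simp [PySem.Int.bitCount_zero]
        simp [PySem.Int.bitCount_zero, List.count_cons, ← ih0]
      · have hpos : 0 < pvLsb (false :: t) := by simp [pvLsb]; omega
        rw [PySem.Int.bitCount_natCast (m := pvLsb (false :: t)) hpos]
        have h2 : pvLsb (false :: t) % 2 = 0 := by simp [pvLsb]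
        have h3 : pvLsb (false :: t) / 2 = pvLsb t := by simp [pvLsb]
        rw [h2, h3, ih, List.count_cons]
        simp

lemma pvGetD_reverse (l : List Bool) (j : Nat) (h : j < l.length) :
    l.reverse.getD j false = l.getD (l.length - 1 - j) false := by
  rw [List.getD_eq_getElem?_getD, List.getD_eq_getElem?_getD, List.getElem?_reverse h]

lemma pvGetD_out {α : Type} (l : List α) (d : α) (j : Nat) (h : l.length ≤ j) :
    l.getD j d = d := by
  rw [List.getD_eq_getElem?_getD, List.getElem?_eq_none h]
  rfl

lemma pvGetD_range_map (m : Nat) (f : Nat → Bool) (i : Nat) (h : i < m) :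
    ((List.range m).map f).getD i false = f i := by
  rw [List.getD_eq_getElem?_getD]
  simp [List.getElem?_map, List.getElem?_range, h]

lemma pvOr_eq (b0 b1 b2 b3 : List Bool) (m : Nat)
    (h0 : b0.length = m) (h1 : b1.length = m) (h2 : b2.length = m) (h3 : b3.length = m) :
    pvLsb b0.reverse ||| pvLsb b1.reverse ||| pvLsb b2.reverse ||| pvLsb b3.reverse =
      pvLsb ((List.range m).map
        (fun i => b0.getD i false || b1.getD i false || b2.getD i false || b3.getD i false)).reverse := by
  apply Nat.eq_of_testBit_eq
  intro j
  simp only [Nat.testBit_or, pvTestBit_lsb]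
  by_cases hj : j < m
  · rw [pvGetD_reverse b0 j (by omega), pvGetD_reverse b1 j (by omega),
      pvGetD_reverse b2 j (by omega), pvGetD_reverse b3 j (by omega),
      pvGetD_reverse _ j (by simp; omega)]
    simp only [h0, h1, h2, h3, List.length_map, List.length_range]
    rw [pvGetD_range_map m _ (m - 1 - j) (by omega)]
  · rw [pvGetD_out _ _ j (by simp; omega), pvGetD_out _ _ j (by simp; omega),
      pvGetD_out _ _ j (by simp; omega), pvGetD_out _ _ j (by simp; omega),
      pvGetD_out _ _ j (by simp; omega)]
    simp

lemma pvBitCond (N k : Nat) :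
    (PySem.Int.band ((N : Int) >>> k) 1 ≠ 0) ↔ N.testBit k = true := by
  have hshift : ((N : Int) >>> k) = ((N >>> k : Nat) : Int) := by exact_mod_cast rfl
  have hband : PySem.Int.band ((N >>> k : Nat) : Int) 1 = (((N >>> k) &&& 1 : Nat) : Int) := by
    exact_mod_cast PySem.Int.band_natCast (N >>> k) 1
  rw [hshift, hband]
  rw [Nat.and_one_is_mod, Nat.shiftRight_eq_div_pow, Nat.testBit_eq_decide_div_mod_eq]
  constructor
  · intro h
    simp only [decide_eq_true_eq]
    omega
  · intro h
    simp only [decide_eq_true_eq] at h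
    omega

lemma pvCount_chars : ∀ L : List Bool,
    (L.map (fun b => if b then '1' else '0')).count '1' = L.count true := by
  intro L
  induction L with
  | nil => rfl
  | cons b t ih =>
    cases b <;> simp [List.count_cons, ih]

lemma pvGetD_str {α : Type} [Inhabited α] (l : List α) (d : α) (i : Nat) (h : i < l.length) :
    l.getD i d = l[i] := by
  rw [List.getD_eq_getElem?_getD, List.getElem?_eq_getElem h]
  rfl

lemma pvBody_eq (d : PySem.Dict String (List String)) (t0 t1 t2 t3 : String)
    (h1 : (d.getD t1 []).length = (d.getD t0 []).length)
    (h2 : (d.getD t2 []).length = (d.getD t0 []).length)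
    (h3 : (d.getD t3 []).length = (d.getD t0 []).length)
    (hm0 : (pvMasks d).getD t0 0 = pvMaskOf (d.getD t0 []))
    (hm1 : (pvMasks d).getD t1 0 = pvMaskOf (d.getD t1 []))
    (hm2 : (pvMasks d).getD t2 0 = pvMaskOf (d.getD t2 []))
    (hm3 : (pvMasks d).getD t3 0 = pvMaskOf (d.getD t3 []))
    (acc : PySem.Dict (List String) Int × PySem.Dict (List String) String) :
    pvBodyA d acc [t0, t1, t2, t3] = pvBodyB d (pvMasks d) acc [t0, t1, t2, t3] := by
  -- abbreviations
  set v0 := d.getD t0 [] with hv0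
  set v1 := d.getD t1 [] with hv1
  set v2 := d.getD t2 [] with hv2
  set v3 := d.getD t3 [] with hv3
  set m := v0.length with hm
  set f : Nat → Bool := fun i =>
    (v0.map (fun s => s == "1")).getD i false || (v1.map (fun s => s == "1")).getD i false ||
    (v2.map (fun s => s == "1")).getD i false || (v3.map (fun s => s == "1")).getD i false with hf
  set L : List Bool := (List.range m).map f with hL
  set N : Nat := pvLsb L.reverse with hN
  -- the OR of the four masks is ↑N
  have horv : PySem.Int.bor (PySem.Int.bor (PySem.Int.bor ((pvMasks d).getD t0 0)
      ((pvMasks d).getD t1 0)) ((pvMasks d).getD t2 0)) ((pvMasks d).getD t3 0) = ((N : Nat) : Int) := by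
    rw [hm0, hm1, hm2, hm3, pvMaskOf_eq, pvMaskOf_eq, pvMaskOf_eq, pvMaskOf_eq]
    rw [PySem.Int.bor_natCast, PySem.Int.bor_natCast, PySem.Int.bor_natCast]
    rw [hN, hL, hf]
    congr 1
    exact pvOr_eq _ _ _ _ m (by simp [hm]) (by simp [h1]) (by simp [h2]) (by simp [h3])
  -- pointwise bridge: A's existential test equals f i, for i < m
  have hbridge : ∀ i, i < m →
      ((v0.getD i "" = "1" ∨ v1.getD i "" = "1" ∨ v2.getD i "" = "1" ∨ v3.getD i "" = "1") ↔ f i = true) := by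
    intro i hi
    have g : ∀ v : List String, v.length = m →
        (v.map (fun s => s == "1")).getD i false = (v.getD i "" == "1") := by
      intro v hv
      have hi' : i < v.length := by omega
      rw [pvGetD_str _ _ _ (by simpa using hi'), pvGetD_str _ _ _ hi']
      simp [hi']
    rw [hf]
    simp only [g v0 rfl, g v1 h1, g v2 h2, g v3 h3]
    simp only [Bool.or_eq_true, beq_iff_eq]
    tauto
  -- A's result string as a char list
  have hresult :
      ((List.range m).foldl (fun r i => r ++ pvGotA d i [t0, t1, t2, t3]) "").toList =
        L.map (fun b => if b then '1' else '0') := by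
    rw [pvToList_foldl]
    have hstep : ∀ (r : List Char), ∀ i ∈ List.range m,
        r ++ (pvGotA d i [t0, t1, t2, t3]).toList =
        r ++ [if f i then '1' else '0'] := by
      intro r i hi
      have him : i < m := List.mem_range.1 hi
      rw [pvGotA_eq]
      congr 1
      rw [show (if (∃ t ∈ ([t0, t1, t2, t3] : List String), (d.getD t []).getD i "" = "1")
            then ("1" : String) else "0") =
          (if f i then ("1" : String) else "0") from
        if_congr (by rw [pvExists4]; exact hbridge i him) rfl rfl]
      cases hfi : f i <;> simp [hfi]
    rw [PySem.List.foldl_congr_mem _ _ _ _ hstep]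
    rw [PySem.List.foldl_append_singleton_eq_map]
    simp [hL, List.map_map]
  -- B's result string as a char list
  have hBchars :
      (PySem.Str.join "" ((List.range m).map
        (fun i => if PySem.Int.band (((N : Nat) : Int) >>> (m - 1 - i)) 1 ≠ 0 then ("1" : String) else "0"))).toList =
        L.map (fun b => if b then '1' else '0') := by
    rw [PySem.Str.toList_join]
    have hmap : ((List.range m).map
        (fun i => if PySem.Int.band (((N : Nat) : Int) >>> (m - 1 - i)) 1 ≠ 0 then ("1" : String) else "0")).map
          String.toList =
        (L.map (fun b => if b then '1' else '0')).map (fun c => [c]) := by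
      simp only [List.map_map, hL]
      apply List.map_congr_left
      intro i hi
      simp only [Function.comp_apply]
      have him : i < m := List.mem_range.1 hi
      have hcond : (PySem.Int.band (((N : Nat) : Int) >>> (m - 1 - i)) 1 ≠ 0) ↔ f i = true := by
        rw [pvBitCond]
        have hLlen : L.length = m := by simp [hL]
        have htb : N.testBit (m - 1 - i) = L.getD (m - 1 - (m - 1 - i)) false := by
          rw [hN, pvTestBit_lsb, pvGetD_reverse L (m - 1 - i) (by omega), hLlen]
        rw [htb, show m - 1 - (m - 1 - i) = i by omega, hL, pvGetD_range_map m f i him]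
      rw [show (if PySem.Int.band (((N : Nat) : Int) >>> (m - 1 - i)) 1 ≠ 0 then ("1" : String) else "0") =
          (if f i then ("1" : String) else "0") from if_congr hcond rfl rfl]
      cases hfi : f i <;> simp [hfi]
    rw [hmap]
    rw [show ("" : String).toList = ([] : List Char) from rfl]
    rw [PySem.Chars.join_nil_singletons]
  -- string equality
  have hstr : ((List.range m).foldl (fun r i => r ++ pvGotA d i [t0, t1, t2, t3]) "") =
      PySem.Str.join "" ((List.range m).map
        (fun i => if PySem.Int.band (((N : Nat) : Int) >>> (m - 1 - i)) 1 ≠ 0 then ("1" : String) else "0")) := by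
    rw [← String.toList_inj, hresult, hBchars]
  -- score equality
  have hscore : ((PySem.Str.count ((List.range m).foldl
        (fun r i => r ++ pvGotA d i [t0, t1, t2, t3]) "") "1" : Nat) : Int) =
      ((PySem.Int.bitCount ((N : Nat) : Int) : Nat) : Int) := by
    congr 1
    rw [PySem.Str.count_eq]
    rw [show ("1" : String).toList = ['1'] from rfl]
    rw [hresult, pvCount_singleton, pvCount_chars]
    rw [hN, pvBitCount_lsb, List.count_reverse]
  simp only [pvBodyA, pvBodyB, PySem.List.pyGetD_zero_cons]
  rw [← hv0, ← hm, horv, hscore, hstr]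

-- ===== VERDICT (by name: the statement is the Claim_ definition above) =====
theorem create_teams_spec : Claim_equal_create_teams := by
  unfold Claim_equal_create_teams
  intro players _hdom hpre
  unfold Spec_create_teams
  unfold create_teams create_teams_alt
  simp only []
  rcases hpre with hlt | hlen
  · -- fewer than 4 distinct player names: no teams at all
    have hkeys : ∀ x, x ∈ (PySem.Dict.ofList players).keys ↔ x ∈ PySem.List.dedup (players.map (·.1)) := by
      intro x
      have h1 : (PySem.Dict.ofList players).keys = (PySem.Dict.empty.update players).keys := rfl
      rw [h1, pvMem_keys_update, PySem.List.mem_dedup]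
      simp [PySem.Dict.keys_empty]
    have hnd1 : (PySem.Dict.ofList players).keys.Nodup := PySem.Dict.nodup_keys_ofList players
    have hnd2 : (PySem.List.dedup (players.map (·.1))).Nodup := PySem.List.nodup_dedup _
    have hperm : (PySem.Dict.ofList players).keys.Perm (PySem.List.dedup (players.map (·.1))) :=
      (List.perm_ext_iff_of_nodup hnd1 hnd2).2 hkeys
    have hlen' : (PySem.Dict.ofList players).keys.length < 4 := by
      rw [hperm.length_eq]; exact hlt
    rw [pvCombs_eq_nil _ _ hlen']
    rfl
  · -- all bonus lists have the same length
    have key : ∀ t ∈ (PySem.Dict.ofList players).keys,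
        ∃ v, (t, v) ∈ players ∧ (PySem.Dict.ofList players).getD t [] = v := by
      intro t ht
      simp only [PySem.Dict.keys] at ht
      obtain ⟨p, hp, rfl⟩ := List.mem_map.1 ht
      refine ⟨p.2, ?_, ?_⟩
      · have := pvMem_items_ofList players p hp
        simpa using this
      · exact PySem.Dict.getD_of_mem_items _ (by simpa using hp) (PySem.Dict.nodup_keys_ofList players) []
    have hbody : ∀ acc, ∀ team ∈ pvCombs 4 (PySem.Dict.ofList players).keys,
        pvBodyA (PySem.Dict.ofList players) acc team =
        pvBodyB (PySem.Dict.ofList players) (pvMasks (PySem.Dict.ofList players)) acc team := by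
      intro acc team hteam
      obtain ⟨hlen4, hsubl⟩ := pvCombs_mem _ 4 team hteam
      have hsub := hsubl.subset
      rcases team with _ | ⟨t0, _ | ⟨t1, _ | ⟨t2, _ | ⟨t3, rest⟩⟩⟩⟩ <;> simp at hlen4
      subst hlen4
      have ht0 : t0 ∈ (PySem.Dict.ofList players).keys := hsub (by simp)
      have ht1 : t1 ∈ (PySem.Dict.ofList players).keys := hsub (by simp)
      have ht2 : t2 ∈ (PySem.Dict.ofList players).keys := hsub (by simp)
      have ht3 : t3 ∈ (PySem.Dict.ofList players).keys := hsub (by simp)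
      obtain ⟨v0, hv0, he0⟩ := key t0 ht0
      obtain ⟨v1, hv1, he1⟩ := key t1 ht1
      obtain ⟨v2, hv2, he2⟩ := key t2 ht2
      obtain ⟨v3, hv3, he3⟩ := key t3 ht3
      have hnd := PySem.Dict.nodup_keys_ofList players
      exact pvBody_eq _ t0 t1 t2 t3
        (by rw [he1, he0]; exact hlen (t1, v1) hv1 (t0, v0) hv0)
        (by rw [he2, he0]; exact hlen (t2, v2) hv2 (t0, v0) hv0)
        (by rw [he3, he0]; exact hlen (t3, v3) hv3 (t0, v0) hv0)
        (pvMasks_getD _ hnd t0 ht0) (pvMasks_getD _ hnd t1 ht1)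
        (pvMasks_getD _ hnd t2 ht2) (pvMasks_getD _ hnd t3 ht3) acc
    rw [PySem.List.foldl_congr_mem _ _ _ _ hbody]
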